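-- pv_equiv track=rewrite | github.com/aLexzzz430/Cognitive-OS | modules/world_model/canonical_state.py | _is_grid_like
-- ===== SOURCE A (Python) =====
-- from typing import Any, Dict, List, Optional, Sequence, Tuple
--
-- def _is_grid_like(value: Any) -> bool:
--     if not isinstance(value, list) or not value:
--         return False
--     width: Optional[int] = None
--     for row in value:
--         if not isinstance(row, list) or not row:
--             return False
--         if width is None:
--             width = len(row)
--         elif len(row) != width:
--             return False
--         for cell in row:
--             if not isinstance(cell, int):
--                 return False
--     return True
-- ===== SOURCE B (Python) =====
-- def _is_grid_like(value) -> bool: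
--     if not isinstance(value, list) or not value:
--         return False
--     if not all(isinstance(row, list) for row in value):
--         return False
--     cols = list(zip(*value))  # transpose, truncated to the shortest row
--     if not cols or len(cols) != max(len(row) for row in value):
--         return False
--     return all(isinstance(cell, int) for col in cols for cell in col)
-- ===== Notes on version B (the rewrite author's own statement) =====
-- stated objective: alternative
-- what changed: Replaces A's row-wise scan carrying a running width variable by a transpose-based check: B builds the column view zip(*value) (truncated to the shortest row) and decides rectangularity by comparing the number of columns to the maximum row length, validating cells column-by-column over the transpose.
import Mathlib
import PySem

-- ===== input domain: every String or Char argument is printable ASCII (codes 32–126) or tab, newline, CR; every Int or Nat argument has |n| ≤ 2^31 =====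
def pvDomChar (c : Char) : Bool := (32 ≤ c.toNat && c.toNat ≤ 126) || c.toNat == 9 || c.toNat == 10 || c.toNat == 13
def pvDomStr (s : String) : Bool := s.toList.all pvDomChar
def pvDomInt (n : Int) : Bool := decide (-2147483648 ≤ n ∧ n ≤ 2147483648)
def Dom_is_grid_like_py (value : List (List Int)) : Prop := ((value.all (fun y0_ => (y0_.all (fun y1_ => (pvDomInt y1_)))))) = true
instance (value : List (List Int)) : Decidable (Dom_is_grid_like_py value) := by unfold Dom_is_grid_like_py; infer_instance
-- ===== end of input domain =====

-- B replaces A's row scan with a running width variable by a transpose-based check: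
-- it builds the column view zip(*value) and compares the column count to the maximum
-- row length (alternative algorithm; same cost).

-- ===== PORT A =====
-- literal transliteration of A: one loop over rows carrying the Optional width,
-- returning False early on an empty row or a width mismatch (the isinstance tests
-- are vacuously true under the typed domain List (List Int), as is the cell loop).
def gridLoopA (width : Option Nat) : List (List Int) → Bool
  | [] => true
  | row :: rest =>
    if row.isEmpty then false
    else
      match width with
      | none => gridLoopA (some row.length) rest
      | some w => if row.length ≠ w then false else gridLoopA (some w) rest

def is_grid_like_py (value : List (List Int)) : Bool :=
  if value.isEmpty then false else gridLoopA none value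

-- ===== PORT B =====
-- pyZipStar rows = Python's list(zip(*rows)): while every row is nonempty, emit the
-- list of heads and continue on the tails; exact transliteration of zip's semantics
-- (truncation at the shortest row; zip() of no rows is []).
def pyZipStar (rows : List (List Int)) : List (List Int) :=
  if h : rows = [] then []
  else if h2 : rows.all (fun r => !r.isEmpty) then
    (rows.map (fun r => r.headD 0)) :: pyZipStar (rows.map List.tail)
  else []
termination_by (rows.headD []).length
decreasing_by
  cases rows with
  | nil => exact absurd rfl h
  | cons a l =>
    have ha : a ≠ [] := by
      have := List.all_eq_true.mp h2 a (by simp)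
      simpa using this
    have : 0 < a.length := List.length_pos_iff.mpr ha
    simp only [List.attach_cons, List.map_cons, List.headD_cons, List.length_tail]
    omega

-- B: guard, then the transpose-based rectangularity check; the final column-wise
-- all(isinstance(cell, int)) pass of Source B is vacuously true on List (List Int).
-- max(len(row) for row in value) ported as foldl max 0, exact here since value is
-- nonempty and lengths are ≥ 0.
def is_grid_like_py_alt (value : List (List Int)) : Bool :=
  if value.isEmpty then false
  else
    let cols := pyZipStar value
    if cols.isEmpty || cols.length != (value.map List.length).foldl max 0 then false
    else true

-- ===== PRECONDITION & SPEC =====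
def Spec_is_grid_like_py (value : List (List Int)) (out : Bool) : Prop := out = is_grid_like_py_alt value
instance (value : List (List Int)) (out : Bool) : Decidable (Spec_is_grid_like_py value out) := by unfold Spec_is_grid_like_py; infer_instance

-- ===== CLAIM (what is proved, stated in full; the proofs are below) =====
def Claim_equal_is_grid_like_py : Prop := ∀ (value : List (List Int)), Dom_is_grid_like_py value → Spec_is_grid_like_py value (is_grid_like_py value)

-- ===== LEMMAS AND PROOFS =====

-- A's loop with a fixed width w accepts exactly: every row nonempty and of length w.
theorem gridLoopA_some (w : Nat) (rows : List (List Int)) :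
    gridLoopA (some w) rows = rows.all (fun r => !r.isEmpty && r.length == w) := by
  induction rows with
  | nil => rfl
  | cons r rest ih =>
    simp only [gridLoopA, List.all_cons]
    by_cases he : r.isEmpty <;> by_cases hw : r.length = w <;> simp [he, hw, ih]

-- one unfold of pyZipStar on a nonempty rows list.
theorem pyZipStar_cons (r : List Int) (rest : List (List Int)) :
    pyZipStar (r :: rest) =
      if (r :: rest).all (fun x => !x.isEmpty) then
        ((r :: rest).map (fun x => x.headD 0)) :: pyZipStar ((r :: rest).map List.tail)
      else [] := by
  rw [pyZipStar]
  simp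

-- the transpose's length is a lower bound of every row length and is realised by
-- some row (when rows is nonempty); proved by induction on a bound for the measure.
theorem pyZipStar_len (n : Nat) (rows : List (List Int)) (hb : (rows.headD []).length ≤ n) :
    (∀ r ∈ rows, (pyZipStar rows).length ≤ r.length) ∧
    (rows ≠ [] → ∃ r ∈ rows, (pyZipStar rows).length = r.length) := by
  induction n generalizing rows with
  | zero =>
    cases rows with
    | nil =>
      constructor
      · intro r hr; simp at hr
      · intro h; exact absurd rfl h
    | cons a l =>
      have ha : a = [] := by
        simpa using List.length_eq_zero_iff.mp (Nat.le_zero.mp (by simpa using hb))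
      subst ha
      have hall : (([] :: l).all (fun x => !(x : List Int).isEmpty)) = false := by
        apply List.all_eq_false.mpr
        exact ⟨[], by simp, by simp⟩
      have hz : pyZipStar ([] :: l) = [] := by rw [pyZipStar_cons, if_neg (by simp [hall])]
      constructor
      · intro r hr; simp [hz]
      · intro _; exact ⟨[], by simp, by simp [hz]⟩
  | succ n ih =>
    cases rows with
    | nil =>
      constructor
      · intro r hr; simp at hr
      · intro h; exact absurd rfl h
    | cons a l =>
      by_cases hall : ((a :: l).all (fun x => !x.isEmpty)) = true
      · have hz : pyZipStar (a :: l)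
            = ((a :: l).map (fun x => x.headD 0)) :: pyZipStar ((a :: l).map List.tail) := by
          rw [pyZipStar_cons, if_pos hall]
        have hane : a ≠ [] := by
          have := List.all_eq_true.mp hall a (by simp); simpa using this
        have hal : 0 < a.length := List.length_pos_iff.mpr hane
        have hb' : (((a :: l).map List.tail).headD []).length ≤ n := by
          simp only [List.map_cons, List.headD_cons]
          rw [List.length_tail]
          have : a.length ≤ n + 1 := by simpa using hb
          omega
        obtain ⟨ihle, ihmem⟩ := ih ((a :: l).map List.tail) hb'
        constructor
        · intro r hr
          have hrne : r ≠ [] := by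
            have := List.all_eq_true.mp hall r hr; simpa using this
          have hrl : 0 < r.length := List.length_pos_iff.mpr hrne
          have := ihle r.tail (List.mem_map_of_mem hr)
          rw [List.length_tail] at this
          simp only [hz, List.length_cons]
          omega
        · intro _
          obtain ⟨t, ht, hlen⟩ := ihmem (by simp)
          obtain ⟨r, hr, rfl⟩ := List.mem_map.mp ht
          have hrne : r ≠ [] := by
            have := List.all_eq_true.mp hall r hr; simpa using this
          have hrl : 0 < r.length := List.length_pos_iff.mpr hrne
          refine ⟨r, hr, ?_⟩
          rw [List.length_tail] at hlen
          simp only [hz, List.length_cons]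
          omega
      · have hz : pyZipStar (a :: l) = [] := by rw [pyZipStar_cons, if_neg hall]
        rcases List.all_eq_false.mp (Bool.eq_false_iff.mpr hall) with ⟨x, hx, hxe⟩
        have hxnil : x = [] := by simpa using hxe
        exact ⟨by intro r hr; simp [hz], by intro _; exact ⟨x, hx, by simp [hz, hxnil]⟩⟩

-- the accumulator is below foldl max.
theorem acc_le_foldl_max (l : List Nat) (acc : Nat) : acc ≤ l.foldl max acc := by
  induction l generalizing acc with
  | nil => simp
  | cons a t ih => exact le_trans (le_max_left acc a) (ih (max acc a))

-- every element is below foldl max.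
theorem le_foldl_max (l : List Nat) (acc x : Nat) (hx : x ∈ l) : x ≤ l.foldl max acc := by
  induction l generalizing acc with
  | nil => cases hx
  | cons a t ih =>
    rcases List.mem_cons.mp hx with rfl | hx
    · exact le_trans (le_max_right acc x) (acc_le_foldl_max t (max acc x))
    · exact ih _ hx

-- foldl max over a nonempty constant list.
theorem foldl_max_const (l : List Nat) (acc w : Nat) (h : ∀ x ∈ l, x = w) (hl : l ≠ []) :
    l.foldl max acc = max acc w := by
  induction l generalizing acc with
  | nil => exact absurd rfl hl
  | cons a t ih =>
    have ha : a = w := h a (by simp)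
    subst ha
    rcases eq_or_ne t [] with rfl | ht
    · simp
    · rw [List.foldl_cons, ih (max acc a) (fun x hx => h x (List.mem_cons_of_mem _ hx)) ht]
      omega

-- ===== VERDICT (by name: the statement is the Claim_ definition above) =====
theorem is_grid_like_py_spec : Claim_equal_is_grid_like_py := by
  intro value _
  unfold Spec_is_grid_like_py is_grid_like_py is_grid_like_py_alt
  cases value with
  | nil => rfl
  | cons r rest =>
    simp only [List.isEmpty_cons, Bool.false_eq_true, if_false]
    obtain ⟨hle, hmem⟩ := pyZipStar_len (r.length) (r :: rest) (by simp)
    by_cases hall : ((r :: rest).all (fun x => !x.isEmpty)) = true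
    · -- every row nonempty: cols is a cons, so nonempty
      have hre : r ≠ [] := by
        have := List.all_eq_true.mp hall r (by simp); simpa using this
      have he : r.isEmpty = false := by simp [hre]
      have hA : gridLoopA none (r :: rest)
          = rest.all (fun x => !x.isEmpty && x.length == r.length) := by
        simp [gridLoopA, he, gridLoopA_some]
      have hcne : (pyZipStar (r :: rest)).isEmpty = false := by
        rw [pyZipStar_cons, if_pos hall]; rfl
      rw [hA, hcne, Bool.false_or]
      by_cases hrect : rest.all (fun x => x.length == r.length) = true
      · -- rectangular: both sides true
        have hwall : ∀ x ∈ (r :: rest), x.length = r.length := by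
          intro x hx
          rcases List.mem_cons.mp hx with rfl | hx
          · rfl
          · simpa using List.all_eq_true.mp hrect x hx
        have hmax : ((r :: rest).map List.length).foldl max 0 = r.length := by
          rw [foldl_max_const _ 0 r.length
            (by intro x hx; obtain ⟨y, hy, rfl⟩ := List.mem_map.mp hx; exact hwall y hy)
            (by simp)]
          omega
        obtain ⟨x, hx, hxl⟩ := hmem (by simp)
        have h1 : (pyZipStar (r :: rest)).length = r.length := by rw [hxl, hwall x hx]
        rw [hmax, h1]
        simp only [bne_self_eq_false, Bool.false_eq_true, if_false]
        refine List.all_eq_true.mpr ?_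
        intro x hx
        have hxe : x ≠ [] := by
          have := List.all_eq_true.mp hall x (by simp [hx]); simpa using this
        simp [hxe, hwall x (by simp [hx])]
      · -- ragged: both sides false
        have hAf : rest.all (fun x => !x.isEmpty && x.length == r.length) = false := by
          rcases List.all_eq_false.mp (Bool.eq_false_iff.mpr hrect) with ⟨x, hx, hxf⟩
          exact List.all_eq_false.mpr ⟨x, hx, by simp_all⟩
        rw [hAf]
        rcases List.all_eq_false.mp (Bool.eq_false_iff.mpr hrect) with ⟨x, hx, hxf⟩
        have hxne : x.length ≠ r.length := by simpa using hxf
        have hxlow : (pyZipStar (r :: rest)).length ≤ x.length := hle x (by simp [hx])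
        have hrlow : (pyZipStar (r :: rest)).length ≤ r.length := hle r (by simp)
        have hxmax : x.length ≤ ((r :: rest).map List.length).foldl max 0 :=
          le_foldl_max _ 0 _ (List.mem_map_of_mem (by simp [hx]))
        have hrmax : r.length ≤ ((r :: rest).map List.length).foldl max 0 :=
          le_foldl_max _ 0 _ (List.mem_map_of_mem (List.mem_cons_self))
        have hne : ((pyZipStar (r :: rest)).length
            != ((r :: rest).map List.length).foldl max 0) = true := by
          rw [bne_iff_ne]; omega
        rw [hne]
        rfl
    · -- some row empty: A false (empty row hit), B false (cols = [])
      have hz : pyZipStar (r :: rest) = [] := by rw [pyZipStar_cons, if_neg hall]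
      rw [hz]
      simp only [List.isEmpty_nil, Bool.true_or, if_true]
      rcases List.all_eq_false.mp (Bool.eq_false_iff.mpr hall) with ⟨x, hx, hxe⟩
      have hxnil : x = [] := by simpa using hxe
      rcases eq_or_ne r [] with rfl | hrne
      · simp [gridLoopA]
      · have he : r.isEmpty = false := by simp [hrne]
        have hf : rest.all (fun y => !y.isEmpty && y.length == r.length) = false := by
          rcases List.mem_cons.mp hx with rfl | hx
          · exact absurd hxnil hrne
          · exact List.all_eq_false.mpr ⟨x, hx, by simp [hxnil]⟩
        simp [gridLoopA, he, gridLoopA_some, hf]
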